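-- pv_equiv track=rewrite | github.com/linstald/master-thesis-scripts | Necklace/necklace.py | trimNecklace
-- ===== SOURCE A (Python) =====
-- import string
--
-- def trimNecklace(neckl):
--     """
--     Given a necklace `neckl` replaces multiple equal consecutive characters to only one character.
--     Moreover, removes every non alphabetic character if given a string.
--     Hence, this function cleans the necklace and returns its necklace string.
--
--     #### Args:
--     `neckl` a list (or string) representing a necklace string.
--
--     #### Returns:
--     a new string or list that is the trimmed instance of `neckl`.
--     """
--     i = 0
--     trimmed = []
--     while i < len(neckl):
--         while i + 1 < len(neckl) and neckl[i] == neckl[i + 1]: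
--             i += 1
--         if not isinstance(neckl, str) or neckl[i] in string.ascii_letters:
--             trimmed.append(neckl[i])
--         i += 1
--     return "".join(trimmed) if isinstance(neckl, str) else trimmed
-- ===== SOURCE B (Python) =====
-- import string
--
-- def trimNecklace(neckl):
--     # Divide-and-conquer: recursively collapse halves, then merge, dropping
--     # the right half's first representative when it equals the left's last.
--     def collapse(seq):
--         if len(seq) <= 1:
--             return list(seq)
--         mid = len(seq) // 2
--         left = collapse(seq[:mid])
--         right = collapse(seq[mid:])
--         if left and right and left[-1] == right[0]:
--             return left + right[1:]
--         return left + right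
--     reps = collapse(neckl)
--     if isinstance(neckl, str):
--         return ''.join(c for c in reps if c in string.ascii_letters)
--     return reps
-- ===== Notes on version B (the rewrite author's own statement) =====
-- stated objective: alternative
-- what changed: Replaces A's single interleaved index/while scan with a divide-and-conquer: the necklace is split in half, each half is collapsed recursively, and the halves are merged dropping the boundary duplicate; a final comprehension filters non-letters for strings.
import Mathlib
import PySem

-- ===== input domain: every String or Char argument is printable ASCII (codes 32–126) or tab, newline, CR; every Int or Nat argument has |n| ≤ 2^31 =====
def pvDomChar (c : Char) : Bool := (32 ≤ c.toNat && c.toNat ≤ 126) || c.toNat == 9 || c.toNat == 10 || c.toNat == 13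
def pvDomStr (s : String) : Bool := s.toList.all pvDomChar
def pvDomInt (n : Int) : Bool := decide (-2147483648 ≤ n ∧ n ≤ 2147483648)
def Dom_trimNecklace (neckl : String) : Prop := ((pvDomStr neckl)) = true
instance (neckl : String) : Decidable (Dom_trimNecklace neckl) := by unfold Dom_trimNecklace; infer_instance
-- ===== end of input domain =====

-- B collapses duplicate runs by divide-and-conquer (split, recurse, merge at the boundary)
-- instead of A's interleaved index loop; return values are proved equal.

-- `c in string.ascii_letters` for a single character (exact on the ASCII domain)
def pvIsAsciiLetter (c : Char) : Bool := ('a' ≤ c && c ≤ 'z') || ('A' ≤ c && c ≤ 'Z')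

-- ===== PORT A =====
-- A's outer while over i, with the inner while skipping while neckl[i] == neckl[i+1]:
-- one outer step looks at neckl[i] and neckl[i+1]; if equal the element is skipped,
-- otherwise it is appended when it is an ASCII letter.
def pvALoop : List Char → List Char
  | [] => []
  | [c] => if pvIsAsciiLetter c then [c] else []
  | c :: c' :: rest =>
    if c == c' then pvALoop (c' :: rest)
    else if pvIsAsciiLetter c then c :: pvALoop (c' :: rest) else pvALoop (c' :: rest)

def trimNecklace (neckl : String) : String := String.ofList (pvALoop neckl.toList)

-- ===== PORT B =====
-- Source B's boundary merge: drop right's first element when it equals left's last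
def pvMerge (L R : List Char) : List Char :=
  match L.getLast?, R.head? with
  | some x, some y => if x == y then L ++ R.tail else L ++ R
  | _, _ => L ++ R

-- Source B's collapse: split in half, recurse on both halves, merge
def pvCollapse (l : List Char) : List Char :=
  if h : l.length ≤ 1 then l
  else
    let mid := l.length / 2
    pvMerge (pvCollapse (l.take mid)) (pvCollapse (l.drop mid))
termination_by l.length
decreasing_by
  · simp only [List.length_take]; omega
  · simp only [List.length_drop]; omega

def trimNecklace_alt (neckl : String) : String :=
  String.ofList ((pvCollapse neckl.toList).filter pvIsAsciiLetter)

-- ===== PRECONDITION & SPEC =====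
def Spec_trimNecklace (neckl : String) (out : String) : Prop := out = trimNecklace_alt neckl
instance (neckl : String) (out : String) : Decidable (Spec_trimNecklace neckl out) := by unfold Spec_trimNecklace; infer_instance

-- ===== CLAIM (what is proved, stated in full; the proofs are below) =====
def Claim_equal_trimNecklace : Prop := ∀ (neckl : String), Dom_trimNecklace neckl → Spec_trimNecklace neckl (trimNecklace neckl)

-- ===== LEMMAS AND PROOFS =====

-- sequential adjacent-dedup, the common reference form of both programs
def pvDedup : List Char → List Char
  | [] => []
  | [c] => [c]
  | a :: b :: t => if a == b then pvDedup (b :: t) else a :: pvDedup (b :: t)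

theorem pvALoop_eq_filter_dedup (l : List Char) :
    pvALoop l = (pvDedup l).filter pvIsAsciiLetter := by
  induction l using pvDedup.induct with
  | case1 => simp [pvALoop, pvDedup]
  | case2 c => by_cases h : pvIsAsciiLetter c <;> simp [pvALoop, pvDedup, List.filter, h]
  | case3 a b t hab ih => simp [pvALoop, pvDedup, hab, ih]
  | case4 a b t hab ih =>
    by_cases hl : pvIsAsciiLetter a <;>
      simp [pvALoop, pvDedup, hab, ih, hl]

theorem pvDedup_head? (l : List Char) : (pvDedup l).head? = l.head? := by
  induction l using pvDedup.induct with
  | case1 => rfl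
  | case2 c => rfl
  | case3 a b t hab ih =>
    have hab' : a = b := by simpa using hab
    subst hab'
    simp only [pvDedup, hab, if_true]
    rw [ih]; rfl
  | case4 a b t hab ih => simp [pvDedup, hab]

theorem pvDedup_ne_nil (l : List Char) (h : l ≠ []) : pvDedup l ≠ [] := by
  intro hd
  have := pvDedup_head? l
  rw [hd] at this
  cases l with
  | nil => exact h rfl
  | cons a t => simp at this

theorem pvMerge_cons (a : Char) (L R : List Char) (hL : L ≠ []) :
    pvMerge (a :: L) R = a :: pvMerge L R := by
  cases L with
  | nil => exact absurd rfl hL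
  | cons b t =>
    unfold pvMerge
    cases hR : R.head? with
    | none => simp [List.getLast?_cons_cons]
    | some y =>
      simp only [List.getLast?_cons_cons]
      cases hg : (b :: t).getLast? with
      | none => simp at hg
      | some x => by_cases hxy : (x == y) = true <;> simp [hxy]

theorem pvDedup_append (l1 l2 : List Char) (h1 : l1 ≠ []) (h2 : l2 ≠ []) :
    pvDedup (l1 ++ l2) = pvMerge (pvDedup l1) (pvDedup l2) := by
  induction l1 using pvDedup.induct with
  | case1 => exact absurd rfl h1
  | case2 a =>
    cases l2 with
    | nil => exact absurd rfl h2
    | cons c t =>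
      have hhead : (pvDedup (c :: t)).head? = some c := by
        rw [pvDedup_head?]; rfl
      show pvDedup (a :: c :: t) = pvMerge [a] (pvDedup (c :: t))
      unfold pvMerge
      simp only [hhead, List.getLast?_singleton]
      by_cases hac : (a == c) = true
      · have hac' : a = c := by simpa using hac
        cases hD : pvDedup (c :: t) with
        | nil => exact absurd hD (pvDedup_ne_nil _ (by simp))
        | cons d u =>
          have hd : d = c := by
            have := hhead; rw [hD] at this; simpa using this
          simp [pvDedup, hD, hd, hac']
      · simp [pvDedup, hac]
  | case3 a b t hab ih =>
    have e1 : pvDedup ((a :: b :: t) ++ l2) = pvDedup ((b :: t) ++ l2) := by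
      simp [pvDedup, hab]
    rw [e1, ih (by simp)]
    simp [pvDedup, hab]
  | case4 a b t hab ih =>
    have e1 : pvDedup ((a :: b :: t) ++ l2) = a :: pvDedup ((b :: t) ++ l2) := by
      simp [pvDedup, hab]
    rw [e1, ih (by simp)]
    rw [show pvDedup (a :: b :: t) = a :: pvDedup (b :: t) by simp [pvDedup, hab]]
    rw [pvMerge_cons a _ _ (pvDedup_ne_nil _ (by simp))]

theorem pvCollapse_eq_dedup (l : List Char) : pvCollapse l = pvDedup l := by
  induction l using pvCollapse.induct with
  | case1 l h =>
    rw [pvCollapse, dif_pos h]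
    match l, h with
    | [], _ => rfl
    | [c], _ => rfl
  | case2 l h mid ih1 ih2 =>
    rw [pvCollapse, dif_neg h]
    simp only at ih1 ih2 ⊢
    rw [ih1, ih2, ← pvDedup_append, List.take_append_drop]
    · intro hn
      have := congrArg List.length hn
      simp only [List.length_take, List.length_nil] at this
      omega
    · intro hn
      have := congrArg List.length hn
      simp only [List.length_drop, List.length_nil] at this
      omega

-- ===== VERDICT (by name: the statement is the Claim_ definition above) =====
theorem trimNecklace_spec : Claim_equal_trimNecklace := by
  intro neckl _
  unfold Spec_trimNecklace trimNecklace trimNecklace_alt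
  rw [pvCollapse_eq_dedup, pvALoop_eq_filter_dedup]
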